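-- pv_equiv track=rewrite | github.com/swang331/GEOS694_ICG | Lab2/UTMLetterDesignator.py | get_range_string_dict
-- ===== SOURCE A (Python) =====
-- def get_range_string_dict(lat):
--     lat_ranges = {
--         range(72, 84): "X",
--         range(64, 71): "W",
--         range(56, 63): "V",
--         range(48, 55): "U",
--         range(40, 47): "T",
--         range(32, 39): "S",
--         range(24, 31): "R",
--         range(16, 23): "Q",
--         range(8, 17): "P",
--         range(0, 7): "N",
--         range(-8, -1): "M",
--         range(-16, -9): "L",
--         range(-24, -17): "K",
--         range(-32, -25): "J",
--         range(-40, -33): "H",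
--         range(-48, -41): "G",
--         range(-56, -49): "F",
--         range(-64, -57): "E",
--         range(-72, -65): "D",
--         range(-80, -73): "C"
--     }
--
--     for lat_range, UTM_letter in lat_ranges.items():
--         if lat in lat_range:
--             return UTM_letter
--     return "Out of range"
-- ===== SOURCE B (Python) =====
-- # B: precompute one flat int->letter table (first-wins via setdefault, reproducing the 16->'Q' overlap); per call a single dict lookup.
-- _BANDS = [
--     (72, 84, "X"), (64, 71, "W"), (56, 63, "V"), (48, 55, "U"),
--     (40, 47, "T"), (32, 39, "S"), (24, 31, "R"), (16, 23, "Q"),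
--     (8, 17, "P"), (0, 7, "N"), (-8, -1, "M"), (-16, -9, "L"),
--     (-24, -17, "K"), (-32, -25, "J"), (-40, -33, "H"), (-48, -41, "G"),
--     (-56, -49, "F"), (-64, -57, "E"), (-72, -65, "D"), (-80, -73, "C"),
-- ]
-- _TABLE = {}
-- for _lo, _hi, _letter in _BANDS:
--     for _v in range(_lo, _hi):
--         _TABLE.setdefault(_v, _letter)
--
-- def get_range_string_dict(lat):
--     return _TABLE.get(lat, "Out of range")
-- ===== Notes on version B (the rewrite author's own statement) =====
-- stated objective: alternative
-- what changed: Replaces A's per-call linear scan over 20 range objects with a flat int-to-letter dict built once at module level via first-wins setdefault (preserving the 16->'Q' overlap and the gaps), so each call is a single hash lookup.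
import Mathlib
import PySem

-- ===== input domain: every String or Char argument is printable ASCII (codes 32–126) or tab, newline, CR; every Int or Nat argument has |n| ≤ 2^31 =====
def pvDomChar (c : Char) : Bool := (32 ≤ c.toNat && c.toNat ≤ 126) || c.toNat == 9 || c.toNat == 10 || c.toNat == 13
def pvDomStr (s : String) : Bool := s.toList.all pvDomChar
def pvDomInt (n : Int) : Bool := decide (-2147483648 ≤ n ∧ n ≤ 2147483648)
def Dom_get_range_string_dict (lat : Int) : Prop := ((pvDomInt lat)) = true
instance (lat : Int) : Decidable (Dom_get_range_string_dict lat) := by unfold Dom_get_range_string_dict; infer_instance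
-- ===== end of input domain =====

-- B replaces A's per-call linear scan over 20 range objects with a flat int→letter table built
-- once at module level (first-wins), so each call is a single dict lookup (objective: alternative).

-- ===== PORT A =====
-- A's dict literal: ranges (as their element lists) paired with letters, in source order.
def pvLatRanges : List (List Int × String) :=
  [(PySem.List.pyRange 72 84 1, "X"), (PySem.List.pyRange 64 71 1, "W"), (PySem.List.pyRange 56 63 1, "V"), (PySem.List.pyRange 48 55 1, "U"), (PySem.List.pyRange 40 47 1, "T"), (PySem.List.pyRange 32 39 1, "S"), (PySem.List.pyRange 24 31 1, "R"), (PySem.List.pyRange 16 23 1, "Q"), (PySem.List.pyRange 8 17 1, "P"), (PySem.List.pyRange 0 7 1, "N"), (PySem.List.pyRange (-8) (-1) 1, "M"), (PySem.List.pyRange (-16) (-9) 1, "L"), (PySem.List.pyRange (-24) (-17) 1, "K"), (PySem.List.pyRange (-32) (-25) 1, "J"), (PySem.List.pyRange (-40) (-33) 1, "H"), (PySem.List.pyRange (-48) (-41) 1, "G"), (PySem.List.pyRange (-56) (-49) 1, "F"), (PySem.List.pyRange (-64) (-57) 1, "E"), (PySem.List.pyRange (-72) (-65) 1, "D"), (PySem.List.pyRange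 (-80) (-73) 1, "C")]

-- A's loop: the first range containing lat wins, else "Out of range".
def pvALoop (lat : Int) : List (List Int × String) → String
  | [] => "Out of range"
  | (r, letter) :: rest => if lat ∈ r then letter else pvALoop lat rest

def get_range_string_dict (lat : Int) : String := pvALoop lat pvLatRanges

-- ===== PORT B =====
def pvBands : List (Int × Int × String) :=
  [(72, 84, "X"), (64, 71, "W"), (56, 63, "V"), (48, 55, "U"), (40, 47, "T"), (32, 39, "S"), (24, 31, "R"), (16, 23, "Q"), (8, 17, "P"), (0, 7, "N"), (-8, -1, "M"), (-16, -9, "L"), (-24, -17, "K"), (-32, -25, "J"), (-40, -33, "H"), (-48, -41, "G"), (-56, -49, "F"), (-64, -57, "E"), (-72, -65, "D"), (-80, -73, "C")]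

-- B's module-level table: setdefault makes the first (highest-priority) letter win.
def pvTable : PySem.Dict Int String :=
  pvBands.foldl
    (fun d band =>
      (PySem.List.pyRange band.1 band.2.1 1).foldl (fun d v => d.setdefault v band.2.2) d)
    PySem.Dict.empty

def get_range_string_dict_alt (lat : Int) : String := pvTable.getD lat "Out of range"

-- ===== PRECONDITION & SPEC =====
def Spec_get_range_string_dict (lat : Int) (out : String) : Prop := out = get_range_string_dict_alt lat
instance (lat : Int) (out : String) : Decidable (Spec_get_range_string_dict lat out) := by unfold Spec_get_range_string_dict; infer_instance

-- ===== CLAIM (what is proved, stated in full; the proofs are below) =====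
def Claim_equal_get_range_string_dict : Prop := ∀ (lat : Int), Dom_get_range_string_dict lat → Spec_get_range_string_dict lat (get_range_string_dict lat)

-- ===== LEMMAS AND PROOFS =====

-- The fully evaluated table B builds (proved equal to pvTable by rfl below).
def pvTableLit : List (Int × String) := [(72, "X"), (73, "X"), (74, "X"), (75, "X"), (76, "X"), (77, "X"), (78, "X"), (79, "X"), (80, "X"), (81, "X"), (82, "X"), (83, "X"), (64, "W"), (65, "W"), (66, "W"), (67, "W"), (68, "W"), (69, "W"), (70, "W"), (56, "V"), (57, "V"), (58, "V"), (59, "V"), (60, "V"), (61, "V"), (62, "V"), (48, "U"), (49, "U"), (50, "U"), (51, "U"), (52, "U"), (53, "U"), (54, "U"), (40, "T"), (41, "T"), (42, "T"), (43, "T"), (44, "T"), (45, "T"), (46, "T"), (32, "S"), (33, "S"), (34, "S"), (35, "S"), (36, "S"), (37, "S"), (38, "S"), (24, "R"), (25, "R"), (26, "R"), (27, "R"), (28, "R"), (29, "R"), (30, "R"), (16, "Q"), (17, "Q"), (18, "Q"), (19, "Q"), (20, "Q"), (21, "Q"), (22, "Q"), (8, "P"), (9, "P"), (10, "P"), (11,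 "P"), (12, "P"), (13, "P"), (14, "P"), (15, "P"), (0, "N"), (1, "N"), (2, "N"), (3, "N"), (4, "N"), (5, "N"), (6, "N"), (-8, "M"), (-7, "M"), (-6, "M"), (-5, "M"), (-4, "M"), (-3, "M"), (-2, "M"), (-16, "L"), (-15, "L"), (-14, "L"), (-13, "L"), (-12, "L"), (-11, "L"), (-10, "L"), (-24, "K"), (-23, "K"), (-22, "K"), (-21, "K"), (-20, "K"), (-19, "K"), (-18, "K"), (-32, "J"), (-31, "J"), (-30, "J"), (-29, "J"), (-28, "J"), (-27, "J"), (-26, "J"), (-40, "H"), (-39, "H"), (-38, "H"), (-37, "H"), (-36, "H"), (-35, "H"), (-34, "H"), (-48, "G"), (-47, "G"), (-46, "G"), (-45, "G"), (-44, "G"), (-43, "G"), (-42, "G"), (-56, "F"), (-55, "F"), (-54, "F"), (-53, "F"), (-52, "F"), (-51, "F"), (-50, "F"), (-64, "E"), (-63, "E"), (-62, "E"), (-61, "E"), (-60, "E"), (-59, "E"), (-58, "E"), (-72, "D"), (-71, "D"), (-70, "D"), (-69, "D"), (-68, "D"), (-67, "D"), (-66, "D"), (-80, "C"), (-79, "C"),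 (-78, "C"), (-77, "C"), (-76, "C"), (-75, "C"), (-74, "C")]

set_option maxRecDepth 100000 in
theorem pv_htab : pvTable = PySem.Dict.mk pvTableLit := by rfl

theorem pv_alt_eq (lat : Int) :
    get_range_string_dict_alt lat = (PySem.Dict.mk pvTableLit).getD lat "Out of range" := by
  unfold get_range_string_dict_alt; rw [pv_htab]

-- A's loop misses every range ⇒ "Out of range".
theorem pvALoop_out (lat : Int) (L : List (List Int × String))
    (h : ∀ p ∈ L, lat ∉ p.1) : pvALoop lat L = "Out of range" := by
  induction L with
  | nil => rfl
  | cons p rest ih =>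
      obtain ⟨r, letter⟩ := p
      rw [pvALoop, if_neg (h _ (List.mem_cons_self ..))]
      exact ih (fun q hq => h q (List.mem_cons_of_mem _ hq))

-- A returns "Out of range" outside [-80, 84).
theorem pvA_out (lat : Int) (h : lat < -80 ∨ 84 ≤ lat) :
    get_range_string_dict lat = "Out of range" := by
  refine pvALoop_out lat pvLatRanges ?_
  intro p hp
  fin_cases hp <;> simp only [PySem.List.mem_pyRange_one, not_and, not_lt] <;> omega

-- A literal dict whose keys all lie in [-80, 84) misses any lat outside it.
theorem pv_get?_none (lat : Int) (l : List (Int × String))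
    (hk : ∀ p ∈ l, -80 ≤ p.1 ∧ p.1 < 84) (h : lat < -80 ∨ 84 ≤ lat) :
    (PySem.Dict.mk l).get? lat = none := by
  induction l with
  | nil => rfl
  | cons p rest ih =>
      rw [PySem.Dict.get?_mk_cons]
      have hp := hk p (List.mem_cons_self ..)
      have hne : (p.1 == lat) = false := by
        simp only [beq_eq_false_iff_ne, ne_eq]; omega
      rw [hne]
      simp only [Bool.false_eq_true, if_false]
      exact ih (fun q hq => hk q (List.mem_cons_of_mem _ hq))

-- B returns "Out of range" outside [-80, 84).
set_option maxRecDepth 100000 in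
theorem pvB_out (lat : Int) (h : lat < -80 ∨ 84 ≤ lat) :
    get_range_string_dict_alt lat = "Out of range" := by
  have hk : ∀ p ∈ pvTableLit, -80 ≤ p.1 ∧ p.1 < 84 := by decide
  rw [pv_alt_eq, PySem.Dict.getD_eq_get?_getD, pv_get?_none lat pvTableLit hk h]
  rfl

-- ===== VERDICT (by name: the statement is the Claim_ definition above) =====
set_option maxRecDepth 100000 in
theorem get_range_string_dict_spec : Claim_equal_get_range_string_dict := by
  intro lat _
  unfold Spec_get_range_string_dict
  by_cases h : -80 ≤ lat ∧ lat < 84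
  · obtain ⟨h1, h2⟩ := h
    rw [pv_alt_eq]
    interval_cases lat <;> rfl
  · rw [pvA_out lat (by omega), pvB_out lat (by omega)]
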